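-- pv_equiv track=rewrite | github.com/SJWallace/AdventOfCode2024 | Day4.py | check_string_in_rows
-- ===== SOURCE A (Python) =====
-- def extract_diagonals(matrix):
-- 	"""
--     Extracts all diagonals (both directions) from a 2D matrix and concatenates their characters into strings.
--
--     :param matrix: List of Lists representing the 2D matrix
--     :return: A list of strings, each representing a diagonal
--     """
-- 	rows = len(matrix)
-- 	cols = len(matrix[0])
--
-- 	diagonals = []
--
-- 	# Collect all top-left to bottom-right (\) diagonals
-- 	for d in range(rows + cols - 1):
-- 		diagonal = []
-- 		for row in range(rows):
-- 			col = d - row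
-- 			if 0 <= col < cols:
-- 				diagonal.append(matrix[row][col])
-- 		if diagonal:
-- 			diagonals.append("".join(diagonal))
--
-- 	# Collect all top-right to bottom-left (/) diagonals
-- 	for d in range(-cols + 1, rows):
-- 		diagonal = []
-- 		for row in range(rows):
-- 			col = row - d
-- 			if 0 <= col < cols:
-- 				diagonal.append(matrix[row][col])
-- 		if diagonal:
-- 			diagonals.append("".join(diagonal))
--
-- 	return diagonals
--
-- def check_string_in_rows(matrix, search_string):
-- 	string_count = 0
-- 	for row in matrix:
-- 		concatenated_row = "".join(row)
-- 		string_count += concatenated_row.count(search_string)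
-- 		# reverse the string and count again for backwards direction
-- 		concatenated_row_reversed = "".join(reversed(row))
-- 		string_count += concatenated_row_reversed.count(search_string)
--
-- 	# Transpose the matrix - rows to columns and columns to row
-- 	transposed_matrix = list(map(list, zip(*matrix)))
-- 	for row in transposed_matrix:
-- 		concatenated_row = "".join(row)
-- 		string_count += concatenated_row.count(search_string)
-- 		concatenated_row_reversed = "".join(reversed(row))
-- 		string_count += concatenated_row_reversed.count(search_string)
--
-- 	# Now convert the matrix into a series of strings along diagonals and check the forward and backward strings
-- 	diagonals = extract_diagonals(matrix)
-- 	for diagonal in diagonals: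
-- 		string_count += diagonal.count(search_string)
-- 		string_count += diagonal[::-1].count(search_string)
--
-- 	return string_count
-- ===== SOURCE B (Python) =====
-- def check_string_in_rows(matrix, search_string):
--     rows = len(matrix)
--     cols = len(matrix[0])
--     nd = rows + cols - 1
--     diag1 = [[] for _ in range(nd)]     # cells with i + j == d, in row order
--     diag2 = [[] for _ in range(nd)]     # cells with i + (cols - 1 - j) == d, in row order
--     columns = [[] for _ in range(cols)]
--     total = 0
--     for i, row in enumerate(matrix):
--         total += "".join(row).count(search_string)
--         total += "".join(reversed(row)).count(search_string)
--         for j in range(cols):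
--             cell = row[j]
--             diag1[i + j].append(cell)
--             diag2[i + (cols - 1 - j)].append(cell)
--             columns[j].append(cell)
--     for column in columns:
--         total += "".join(column).count(search_string)
--         total += "".join(reversed(column)).count(search_string)
--     for diag in diag1 + diag2:
--         if diag:
--             s = "".join(diag)
--             total += s.count(search_string)
--             total += s[::-1].count(search_string)
--     return total
-- ===== Notes on version B (the rewrite author's own statement) =====
-- stated objective: alternative
-- what changed: B makes one row-major pass over the matrix, dropping each cell into its column, \-diagonal and /-diagonal bucket keyed by j, i+j and i+(cols-1-j), instead of A's re-scan of all rows once per diagonal (and zip-based transpose); the counting over the assembled lines is unchanged.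
import Mathlib
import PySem

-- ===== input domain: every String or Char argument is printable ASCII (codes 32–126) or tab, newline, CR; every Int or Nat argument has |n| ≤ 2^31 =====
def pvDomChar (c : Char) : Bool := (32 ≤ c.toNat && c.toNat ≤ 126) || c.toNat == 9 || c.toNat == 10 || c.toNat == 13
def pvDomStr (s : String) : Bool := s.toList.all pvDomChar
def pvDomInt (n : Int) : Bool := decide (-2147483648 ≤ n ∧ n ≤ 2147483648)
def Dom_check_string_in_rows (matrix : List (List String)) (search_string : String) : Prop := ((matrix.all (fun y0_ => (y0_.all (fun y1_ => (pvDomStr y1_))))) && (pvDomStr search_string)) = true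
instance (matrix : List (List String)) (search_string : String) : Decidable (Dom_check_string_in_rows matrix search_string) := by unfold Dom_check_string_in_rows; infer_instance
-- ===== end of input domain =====

-- B groups every cell into its row/column/diagonal/antidiagonal bucket in ONE row-major pass
-- (A instead rescans all rows once per diagonal); same return value on every input A accepts.

-- ===== PORT A =====
-- "".join(cells)
def pvJoin (cells : List String) : String := PySem.Str.join "" cells
-- s.count(sub), as a Python int
def pvCnt (s sub : String) : Int := (PySem.Str.count s sub : Int)
-- s[::-1]  (exact: PySem.Str.slice?_none_none_neg_one; step -1 never yields none)
def pvRev (s : String) : String := (PySem.Str.slice? s none none (-1)).getD ""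
-- matrix[row][col]; Pre_ keeps both indexes in range, so the defaults are never read
def pvCell (matrix : List (List String)) (row col : Int) : String :=
  PySem.List.pyGetD (PySem.List.pyGetD matrix row []) col ""

def extract_diagonals (matrix : List (List String)) : List String :=
  let rows : Int := (matrix.length : Int)
  -- len(matrix[0]); matrix = [] raises IndexError (excluded by Pre_), the default is never read
  let cols : Int := ((matrix.headD []).length : Int)
  let d1 := (PySem.List.pyRange 0 (rows + cols - 1)).foldl (fun ds d =>
      let diag := (PySem.List.pyRange 0 rows).foldl (fun dl row =>
          let col := d - row
          if 0 ≤ col ∧ col < cols then dl ++ [pvCell matrix row col] else dl) []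
      if diag ≠ [] then ds ++ [pvJoin diag] else ds) []
  (PySem.List.pyRange (-cols + 1) rows).foldl (fun ds d =>
      let diag := (PySem.List.pyRange 0 rows).foldl (fun dl row =>
          let col := row - d
          if 0 ≤ col ∧ col < cols then dl ++ [pvCell matrix row col] else dl) []
      if diag ≠ [] then ds ++ [pvJoin diag] else ds) d1

-- zip(*matrix): tuples up to the shortest row (the exact contract of zip);
-- for j below the shortest length the getD default is never read
def pvZipStar (m : List (List String)) : List (List String) :=
  match m with
  | [] => []
  | r0 :: rest =>
    let n := rest.foldl (fun acc r => min acc r.length) r0.length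
    (List.range n).map (fun j => m.map (fun r => r.getD j ""))

def check_string_in_rows (matrix : List (List String)) (search_string : String) : Int :=
  let c1 := matrix.foldl (fun acc row =>
      acc + pvCnt (pvJoin row) search_string + pvCnt (pvJoin row.reverse) search_string) 0
  let c2 := (pvZipStar matrix).foldl (fun acc row =>
      acc + pvCnt (pvJoin row) search_string + pvCnt (pvJoin row.reverse) search_string) c1
  (extract_diagonals matrix).foldl (fun acc dg =>
      acc + pvCnt dg search_string + pvCnt (pvRev dg) search_string) c2

-- ===== PORT B =====
-- one iteration of Source B's main loop: count in the row, then drop each of the first `cols`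
-- cells into its \-diagonal, /-diagonal and column bucket (all bucket indexes are ≥ 0,
-- so .toNat is exact)
def pvBRow (cols : Int) (search_string : String)
    (st : List (List String) × List (List String) × List (List String) × Int)
    (p : Int × List String) :
    List (List String) × List (List String) × List (List String) × Int :=
  let i := p.1
  let row := p.2
  let t := st.2.2.2 + pvCnt (pvJoin row) search_string
      + pvCnt (pvJoin row.reverse) search_string
  let bs := (PySem.List.pyRange 0 cols).foldl
      (fun (b : List (List String) × List (List String) × List (List String)) j =>
        let cell := PySem.List.pyGetD row j ""
        (b.1.modify (i + j).toNat (· ++ [cell]),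
         b.2.1.modify (i + (cols - 1 - j)).toNat (· ++ [cell]),
         b.2.2.modify j.toNat (· ++ [cell])))
      (st.1, st.2.1, st.2.2.1)
  (bs.1, bs.2.1, bs.2.2, t)

def check_string_in_rows_alt (matrix : List (List String)) (search_string : String) : Int :=
  let rows : Int := (matrix.length : Int)
  let cols : Int := ((matrix.headD []).length : Int)   -- len(matrix[0]); matrix = [] raises
  let nd := rows + cols - 1
  let st := (PySem.List.enumerate matrix).foldl (pvBRow cols search_string)
      (List.replicate nd.toNat [], List.replicate nd.toNat [], List.replicate cols.toNat [], 0)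
  let t1 := st.2.2.1.foldl (fun acc column =>
      acc + pvCnt (pvJoin column) search_string
          + pvCnt (pvJoin column.reverse) search_string) st.2.2.2
  (st.1 ++ st.2.1).foldl (fun acc diag =>
      if diag ≠ [] then
        acc + pvCnt (pvJoin diag) search_string + pvCnt (pvRev (pvJoin diag)) search_string
      else acc) t1

-- ===== PRECONDITION & SPEC =====
-- Pre_ excludes exactly the inputs where A raises: the empty matrix (IndexError on matrix[0])
-- and matrices with a row shorter than the first row (IndexError inside extract_diagonals).
def Pre_check_string_in_rows (matrix : List (List String)) (search_string : String) : Prop :=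
  matrix ≠ [] ∧ ∀ row ∈ matrix, (matrix.headD []).length ≤ row.length
instance (matrix : List (List String)) (search_string : String) : Decidable (Pre_check_string_in_rows matrix search_string) := by unfold Pre_check_string_in_rows; infer_instance

def pvWitness_check_string_in_rows : List (List String) × String :=
  ([["X", "M"], ["M", "S"]], "XM")

def Spec_check_string_in_rows (matrix : List (List String)) (search_string : String) (out : Int) : Prop := out = check_string_in_rows_alt matrix search_string
instance (matrix : List (List String)) (search_string : String) (out : Int) : Decidable (Spec_check_string_in_rows matrix search_string out) := by unfold Spec_check_string_in_rows; infer_instance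

-- ===== CLAIM (what is proved, stated in full; the proofs are below) =====
def Claim_equal_check_string_in_rows : Prop := ∀ (matrix : List (List String)) (search_string : String), Dom_check_string_in_rows matrix search_string → Pre_check_string_in_rows matrix search_string → Spec_check_string_in_rows matrix search_string (check_string_in_rows matrix search_string)

-- ===== LEMMAS AND PROOFS =====

-- matrix[i][j] with Nat indexes (the common value of both ports' cell reads)
def cellN (m : List (List String)) (i j : Nat) : String := (m.getD i []).getD j ""
-- the cells of the \-diagonal i + j = k, row order
def dcells1 (m : List (List String)) (C k : Nat) : List String :=
  ((List.range m.length).filter (fun i => decide (i ≤ k ∧ k - i < C))).map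
    (fun i => cellN m i (k - i))
-- the cells of the /-diagonal i + (C-1-j) = k, row order
def dcells2 (m : List (List String)) (C k : Nat) : List String :=
  ((List.range m.length).filter (fun i => decide (i ≤ k ∧ k - i < C))).map
    (fun i => cellN m i (C - 1 - (k - i)))
-- column j, top to bottom
def colCells (m : List (List String)) (j : Nat) : List String := m.map (fun r => r.getD j "")

theorem pyRange_one_eq_map (n : Nat) : ∀ (a : Int),
    PySem.List.pyRange a (a + (n : Int)) = (List.range n).map (fun k : Nat => a + (k : Int)) := by
  induction n with
  | zero =>
    intro a
    have : (PySem.List.pyRange a (a + ((0:Nat) : Int))).length = 0 := by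
      rw [PySem.List.length_pyRange_one]; omega
    simpa using List.eq_nil_of_length_eq_zero this
  | succ n ih =>
    intro a
    rw [PySem.List.pyRange_one_cons (by omega : a < a + ((n+1 : Nat) : Int))]
    have h2 : a + ((n+1 : Nat) : Int) = (a + 1) + ((n : Nat) : Int) := by push_cast; ring
    rw [h2, ih (a+1), List.range_succ_eq_map]
    simp only [List.map_cons, List.map_map, Nat.cast_zero, add_zero, List.cons.injEq]
    refine ⟨trivial, List.map_congr_left ?_⟩
    intro k _
    simp only [Function.comp]
    push_cast; ring

theorem A_inner1 (m : List (List String)) (k : Nat) :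
    (PySem.List.pyRange 0 (m.length : Int)).foldl (fun dl row =>
        let col := (k : Int) - row
        if 0 ≤ col ∧ col < (((m.headD []).length : Nat) : Int) then
          dl ++ [pvCell m row col] else dl) [] =
      dcells1 m (m.headD []).length k := by
  rw [PySem.List.pyRange_zero_natCast, List.foldl_map]
  show List.foldl (fun dl (i : Nat) =>
      if 0 ≤ (k : Int) - (i : Int) ∧ (k : Int) - (i : Int) < (((m.headD []).length : Nat) : Int)
      then dl ++ [pvCell m (i : Int) ((k : Int) - (i : Int))] else dl) [] (List.range m.length) = _
  rw [PySem.List.foldl_append_ite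
      (p := fun i : Nat => 0 ≤ (k : Int) - (i : Int) ∧ (k : Int) - (i : Int) < (((m.headD []).length : Nat) : Int))
      (f := fun i : Nat => pvCell m (i : Int) ((k : Int) - (i : Int)))]
  rw [List.nil_append]
  unfold dcells1
  rw [List.filter_congr
      (q := fun i => decide (i ≤ k ∧ k - i < (m.headD []).length))
      (fun i _ => by simp only [decide_eq_decide]; omega)]
  apply List.map_congr_left
  intro i hi
  have hik : i ≤ k := by
    have := List.of_mem_filter hi
    simp only [decide_eq_true_eq] at this
    exact this.1
  have hc : (k : Int) - (i : Int) = ((k - i : Nat) : Int) := by omega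
  unfold pvCell cellN
  rw [hc, PySem.List.pyGetD_natCast, PySem.List.pyGetD_natCast]

theorem A_inner2 (m : List (List String)) (k : Nat) :
    (PySem.List.pyRange 0 (m.length : Int)).foldl (fun dl row =>
        let col := row - (-(((m.headD []).length : Nat) : Int) + 1 + (k : Int))
        if 0 ≤ col ∧ col < (((m.headD []).length : Nat) : Int) then
          dl ++ [pvCell m row col] else dl) [] =
      dcells2 m (m.headD []).length k := by
  rw [PySem.List.pyRange_zero_natCast, List.foldl_map]
  show List.foldl (fun dl (i : Nat) =>
      if 0 ≤ (i : Int) - (-(((m.headD []).length : Nat) : Int) + 1 + (k : Int)) ∧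
         (i : Int) - (-(((m.headD []).length : Nat) : Int) + 1 + (k : Int)) < (((m.headD []).length : Nat) : Int)
      then dl ++ [pvCell m (i : Int) ((i : Int) - (-(((m.headD []).length : Nat) : Int) + 1 + (k : Int)))]
      else dl) [] (List.range m.length) = _
  rw [PySem.List.foldl_append_ite
      (p := fun i : Nat => 0 ≤ (i : Int) - (-(((m.headD []).length : Nat) : Int) + 1 + (k : Int)) ∧
        (i : Int) - (-(((m.headD []).length : Nat) : Int) + 1 + (k : Int)) < (((m.headD []).length : Nat) : Int))
      (f := fun i : Nat => pvCell m (i : Int) ((i : Int) - (-(((m.headD []).length : Nat) : Int) + 1 + (k : Int))))]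
  rw [List.nil_append]
  unfold dcells2
  rw [List.filter_congr
      (q := fun i => decide (i ≤ k ∧ k - i < (m.headD []).length))
      (fun i _ => by simp only [decide_eq_decide]; omega)]
  apply List.map_congr_left
  intro i hi
  have hik : i ≤ k ∧ k - i < (m.headD []).length := by
    have := List.of_mem_filter hi
    simpa using this
  have hc : (i : Int) - (-(((m.headD []).length : Nat) : Int) + 1 + (k : Int)) =
      (((m.headD []).length - 1 - (k - i) : Nat) : Int) := by omega
  unfold pvCell cellN
  rw [hc, PySem.List.pyGetD_natCast, PySem.List.pyGetD_natCast]

theorem A_extract (m : List (List String)) (hm : m ≠ []) :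
    extract_diagonals m =
      ((((List.range (m.length + (m.headD []).length - 1)).map
            (dcells1 m (m.headD []).length)) ++
        ((List.range (m.length + (m.headD []).length - 1)).map
            (dcells2 m (m.headD []).length))).filter
          (fun dl => decide (dl ≠ []))).map pvJoin := by
  have hR : 1 ≤ m.length := by
    cases m with
    | nil => exact absurd rfl hm
    | cons a t => simp
  unfold extract_diagonals
  simp only []
  rw [show (m.length : Int) + (((m.headD []).length : Nat) : Int) - 1 =
      ((m.length + (m.headD []).length - 1 : Nat) : Int) from by omega]
  have h1 := PySem.List.pyRange_zero_natCast (m.length + (m.headD []).length - 1)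
  rw [h1, List.foldl_map]
  have h2 : PySem.List.pyRange (-(((m.headD []).length : Nat) : Int) + 1) (m.length : Int) =
      (List.range (m.length + (m.headD []).length - 1)).map
        (fun k : Nat => -(((m.headD []).length : Nat) : Int) + 1 + (k : Int)) := by
    rw [show (m.length : Int) = -(((m.headD []).length : Nat) : Int) + 1 +
        ((m.length + (m.headD []).length - 1 : Nat) : Int) from by omega]
    exact pyRange_one_eq_map _ _
  rw [h2, List.foldl_map]
  simp only [A_inner1, A_inner2]
  rw [PySem.List.foldl_append_ite
      (p := fun k : Nat => dcells1 m (m.headD []).length k ≠ [])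
      (f := fun k : Nat => pvJoin (dcells1 m (m.headD []).length k))]
  rw [PySem.List.foldl_append_ite
      (p := fun k : Nat => dcells2 m (m.headD []).length k ≠ [])
      (f := fun k : Nat => pvJoin (dcells2 m (m.headD []).length k))]
  simp [List.filter_append, List.filter_map, Function.comp_def]

theorem A_cols (m : List (List String)) (hm : m ≠ [])
    (hr : ∀ row ∈ m, (m.headD []).length ≤ row.length) :
    pvZipStar m = (List.range (m.headD []).length).map (colCells m) := by
  cases m with
  | nil => exact absurd rfl hm
  | cons r0 rest =>
    simp only [List.headD_cons] at hr ⊢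
    unfold pvZipStar
    simp only []
    have hn : rest.foldl (fun acc r => min acc r.length) r0.length = r0.length := by
      have : ∀ (l : List (List String)) (a : Nat), (∀ r ∈ l, a ≤ r.length) →
          l.foldl (fun acc r => min acc r.length) a = a := by
        intro l
        induction l with
        | nil => intro a _; rfl
        | cons x t ih =>
          intro a ha
          simp only [List.foldl_cons]
          rw [min_eq_left (ha x (List.mem_cons_self))]
          exact ih a (fun r hrr => ha r (List.mem_cons_of_mem _ hrr))
      exact this rest r0.length (fun r hrr => hr r (List.mem_cons_of_mem _ hrr))
    rw [hn]
    rfl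

-- the generic "append v to bucket key" loop
def bfold (ups : List (Int × String)) (bs : List (List String)) : List (List String) :=
  ups.foldl (fun bs kv => bs.modify kv.1.toNat (· ++ [kv.2])) bs

theorem length_bfold (ups : List (Int × String)) (bs : List (List String)) :
    (bfold ups bs).length = bs.length := by
  induction ups generalizing bs with
  | nil => rfl
  | cons kv t ih =>
    show (bfold t (bs.modify kv.1.toNat (· ++ [kv.2]))).length = bs.length
    rw [ih, List.length_modify]

theorem getD_bfold (ups : List (Int × String)) (bs : List (List String))
    (h : ∀ kv ∈ ups, 0 ≤ kv.1 ∧ kv.1 < (bs.length : Int)) (k : Nat) :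
    (bfold ups bs).getD k [] =
      bs.getD k [] ++ (ups.filter (fun kv => kv.1 == (k : Int))).map Prod.snd := by
  induction ups generalizing bs with
  | nil => simp [bfold]
  | cons kv t ih =>
    obtain ⟨key, v⟩ := kv
    have hb := h _ List.mem_cons_self
    simp only at hb
    have hlen : (bs.modify key.toNat (· ++ [v])).length = bs.length := List.length_modify _ _ _
    have ht : ∀ kv ∈ t, 0 ≤ kv.1 ∧ kv.1 < ((bs.modify key.toNat (· ++ [v])).length : Int) := by
      intro kv hkv; rw [hlen]; exact h kv (List.mem_cons_of_mem _ hkv)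
    show (bfold t (bs.modify key.toNat (· ++ [v]))).getD k [] = _
    rw [ih _ ht]
    have hmod : (bs.modify key.toNat (· ++ [v])).getD k [] =
        if key.toNat = k then bs.getD k [] ++ [v] else bs.getD k [] := by
      by_cases hk : k < bs.length
      · rw [List.getD_eq_getElem?_getD, List.getElem?_modify]
        by_cases hkk : key.toNat = k
        · simp [hkk, List.getElem?_eq_getElem (by omega : k < bs.length),
            List.getD_eq_getElem?_getD]
        · simp [hkk, List.getD_eq_getElem?_getD]
      · have hkk : ¬ key.toNat = k := by omega
        simp [hkk, List.getD_eq_getElem?_getD, List.getElem?_modify]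
    rw [hmod]
    by_cases hkk : key.toNat = k
    · have hbeq : (key == (k : Int)) = true := by
        simp only [beq_iff_eq]; omega
      simp [List.filter_cons, hbeq, hkk, List.append_assoc]
    · have hbeq : (key == (k : Int)) = false := by
        simp only [beq_eq_false_iff_ne, ne_eq]; omega
      simp [List.filter_cons, hbeq, hkk]

theorem filter_range_add (iN k : Nat) : ∀ n : Nat,
    (List.range n).filter (fun j : Nat => ((iN : Int) + (j : Int) == (k : Int))) =
      if iN ≤ k ∧ k - iN < n then [k - iN] else [] := by
  intro n
  induction n with
  | zero => simp
  | succ n ih =>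
    rw [List.range_succ, List.filter_append, ih, List.filter_singleton]
    by_cases hB : (iN : Int) + (n : Int) = (k : Int)
    · have hc : ((iN : Int) + (n : Int) == (k : Int)) = true := by simpa using hB
      rw [hc, if_neg (by omega : ¬(iN ≤ k ∧ k - iN < n))]
      simp only [Bool.cond_true, List.nil_append]
      rw [if_pos (by omega : iN ≤ k ∧ k - iN < n + 1)]
      simp only [List.cons.injEq, and_true]
      omega
    · have hc : ((iN : Int) + (n : Int) == (k : Int)) = false := by simpa using hB
      rw [hc]
      simp only [Bool.cond_false, List.append_nil]
      by_cases hA : iN ≤ k ∧ k - iN < n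
      · rw [if_pos hA, if_pos (by omega : iN ≤ k ∧ k - iN < n + 1)]
      · rw [if_neg hA, if_neg (by omega : ¬(iN ≤ k ∧ k - iN < n + 1))]

theorem filter_range_anti (C iN k : Nat) : ∀ n : Nat,
    (List.range n).filter (fun j : Nat => ((iN : Int) + ((C : Int) - 1 - (j : Int)) == (k : Int))) =
      if k + 1 ≤ iN + C ∧ iN + C - 1 - k < n then [iN + C - 1 - k] else [] := by
  intro n
  induction n with
  | zero => simp
  | succ n ih =>
    rw [List.range_succ, List.filter_append, ih, List.filter_singleton]
    by_cases hB : (iN : Int) + ((C : Int) - 1 - (n : Int)) = (k : Int)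
    · have hc : ((iN : Int) + ((C : Int) - 1 - (n : Int)) == (k : Int)) = true := by simpa using hB
      rw [hc, if_neg (by omega : ¬(k + 1 ≤ iN + C ∧ iN + C - 1 - k < n))]
      simp only [Bool.cond_true, List.nil_append]
      rw [if_pos (by omega : k + 1 ≤ iN + C ∧ iN + C - 1 - k < n + 1)]
      simp only [List.cons.injEq, and_true]
      omega
    · have hc : ((iN : Int) + ((C : Int) - 1 - (n : Int)) == (k : Int)) = false := by simpa using hB
      rw [hc]
      simp only [Bool.cond_false, List.append_nil]
      by_cases hA : k + 1 ≤ iN + C ∧ iN + C - 1 - k < n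
      · rw [if_pos hA, if_pos (by omega : k + 1 ≤ iN + C ∧ iN + C - 1 - k < n + 1)]
      · rw [if_neg hA, if_neg (by omega : ¬(k + 1 ≤ iN + C ∧ iN + C - 1 - k < n + 1))]

theorem flatMap_ite_singleton {α : Type} (l : List Nat) (p : Nat → Prop) [DecidablePred p]
    (f : Nat → α) :
    l.flatMap (fun x => if p x then [f x] else []) = (l.filter (fun x => decide (p x))).map f := by
  induction l with
  | nil => rfl
  | cons x t ih => by_cases hx : p x <;> simp [hx, ih]

-- all the cell→bucket updates of Source B's main loop, flattened in traversal order
def upsOf (m : List (List String)) (cols : Int) (key : Int → Int → Int) : List (Int × String) :=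
  (PySem.List.enumerate m).flatMap (fun p =>
    (PySem.List.pyRange 0 cols).map (fun j => (key p.1 j, PySem.List.pyGetD p.2 j "")))

theorem upsOf_eq (m : List (List String)) (C : Nat) (key : Int → Int → Int) :
    upsOf m (C : Int) key =
      (List.range m.length).flatMap (fun i : Nat =>
        (List.range C).map (fun j : Nat => (key (i : Int) (j : Int), cellN m i j))) := by
  unfold upsOf
  rw [PySem.List.enumerate_eq_map_pyRange m ([] : List String)]
  have hlen : PySem.List.len m = ((m.length : Nat) : Int) := rfl
  rw [hlen, PySem.List.pyRange_zero_natCast m.length, List.map_map, List.flatMap_map]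
  congr 1
  funext i
  simp only [Function.comp]
  rw [PySem.List.pyRange_zero_natCast C, List.map_map]
  congr 1
  funext j
  simp [cellN, PySem.List.pyGetD_natCast]

theorem ups_filter1 (m : List (List String)) (C k : Nat) :
    ((upsOf m (C : Int) (fun i j => i + j)).filter (fun kv => kv.1 == (k : Int))).map Prod.snd
      = dcells1 m C k := by
  rw [upsOf_eq, List.filter_flatMap, List.map_flatMap]
  have hper : ∀ i : Nat,
      (((List.range C).map (fun j : Nat => ((i : Int) + (j : Int), cellN m i j))).filter
          (fun kv => kv.1 == (k : Int))).map Prod.snd =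
        if i ≤ k ∧ k - i < C then [cellN m i (k - i)] else [] := by
    intro i
    rw [List.filter_map]
    have hcomp : ((fun kv : Int × String => kv.1 == (k : Int)) ∘
        (fun j : Nat => ((i : Int) + (j : Int), cellN m i j))) =
        fun j : Nat => ((i : Int) + (j : Int) == (k : Int)) := rfl
    rw [hcomp, filter_range_add]
    by_cases hc : i ≤ k ∧ k - i < C
    · rw [if_pos hc, if_pos hc]; rfl
    · rw [if_neg hc, if_neg hc]; rfl
  simp only [hper]
  rw [flatMap_ite_singleton (p := fun i => i ≤ k ∧ k - i < C)
      (f := fun i => cellN m i (k - i))]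
  rfl

theorem ups_filter2 (m : List (List String)) (C k : Nat) :
    ((upsOf m (C : Int) (fun i j => i + ((C : Int) - 1 - j))).filter
        (fun kv => kv.1 == (k : Int))).map Prod.snd
      = dcells2 m C k := by
  rw [upsOf_eq, List.filter_flatMap, List.map_flatMap]
  have hper : ∀ i : Nat,
      (((List.range C).map (fun j : Nat => ((i : Int) + ((C : Int) - 1 - (j : Int)), cellN m i j))).filter
          (fun kv => kv.1 == (k : Int))).map Prod.snd =
        if i ≤ k ∧ k - i < C then [cellN m i (C - 1 - (k - i))] else [] := by
    intro i
    rw [List.filter_map]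
    have hcomp : ((fun kv : Int × String => kv.1 == (k : Int)) ∘
        (fun j : Nat => ((i : Int) + ((C : Int) - 1 - (j : Int)), cellN m i j))) =
        fun j : Nat => ((i : Int) + ((C : Int) - 1 - (j : Int)) == (k : Int)) := rfl
    rw [hcomp, filter_range_anti]
    by_cases h1 : k + 1 ≤ i + C ∧ i + C - 1 - k < C
    · rw [if_pos h1, if_pos (by omega : i ≤ k ∧ k - i < C)]
      simp only [List.map_cons, List.map_nil]
      have h2 : i + C - 1 - k = C - 1 - (k - i) := by omega
      rw [h2]
    · rw [if_neg h1, if_neg (by omega : ¬(i ≤ k ∧ k - i < C))]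
      rfl
  simp only [hper]
  rw [flatMap_ite_singleton (p := fun i => i ≤ k ∧ k - i < C)
      (f := fun i => cellN m i (C - 1 - (k - i)))]
  rfl

theorem ups_filter3 (m : List (List String)) (C k : Nat) (hk : k < C) :
    ((upsOf m (C : Int) (fun _ j => j)).filter (fun kv => kv.1 == (k : Int))).map Prod.snd
      = colCells m k := by
  rw [upsOf_eq, List.filter_flatMap, List.map_flatMap]
  have hper : ∀ i : Nat,
      (((List.range C).map (fun j : Nat => ((j : Int), cellN m i j))).filter
          (fun kv => kv.1 == (k : Int))).map Prod.snd = [cellN m i k] := by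
    intro i
    rw [List.filter_map]
    have hcomp : ((fun kv : Int × String => kv.1 == (k : Int)) ∘
        (fun j : Nat => ((j : Int), cellN m i j))) =
        fun j : Nat => (((0 : Nat) : Int) + (j : Int) == (k : Int)) := by
      funext j; simp
    rw [hcomp, filter_range_add]
    rw [if_pos (by omega : (0 : Nat) ≤ k ∧ k - 0 < C)]
    rfl
  simp only [hper]
  rw [← List.map_eq_flatMap]
  apply List.ext_getElem
  · simp [colCells]
  · intro i h1 h2
    simp only [List.getElem_map, List.getElem_range, colCells, cellN]
    rw [List.getD_eq_getElem m [] (by simpa using h1)]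

theorem bstep_fold (m : List (List String)) (cols : Int) (key : Int → Int → Int)
    (Z : List (List String)) :
    (PySem.List.enumerate m).foldl (fun b p => (PySem.List.pyRange 0 cols).foldl
        (fun b j => b.modify (key p.1 j).toNat (· ++ [PySem.List.pyGetD p.2 j ""])) b) Z =
      bfold (upsOf m cols key) Z := by
  unfold bfold upsOf
  rw [List.foldl_flatMap]
  simp only [List.foldl_map]

theorem getD_replicate_nil (n k : Nat) :
    (List.replicate n ([] : List String)).getD k [] = [] := by
  rw [List.getD_eq_getElem?_getD, List.getElem?_replicate]
  split <;> rfl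

theorem bucket_bound1 (m : List (List String)) :
    ∀ kv ∈ upsOf m (((m.headD []).length : Nat) : Int) (fun i j => i + j),
      0 ≤ kv.1 ∧ kv.1 < ((m.length + (m.headD []).length - 1 : Nat) : Int) := by
  intro kv hkv
  rw [upsOf_eq] at hkv
  simp only [List.mem_flatMap, List.mem_map, List.mem_range] at hkv
  obtain ⟨i, hi, j, hj, rfl⟩ := hkv
  simp only
  omega

theorem bucket_bound2 (m : List (List String)) :
    ∀ kv ∈ upsOf m (((m.headD []).length : Nat) : Int)
        (fun i j => i + ((((m.headD []).length : Nat) : Int) - 1 - j)),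
      0 ≤ kv.1 ∧ kv.1 < ((m.length + (m.headD []).length - 1 : Nat) : Int) := by
  intro kv hkv
  rw [upsOf_eq] at hkv
  simp only [List.mem_flatMap, List.mem_map, List.mem_range] at hkv
  obtain ⟨i, hi, j, hj, rfl⟩ := hkv
  simp only
  omega

theorem bucket_bound3 (m : List (List String)) :
    ∀ kv ∈ upsOf m (((m.headD []).length : Nat) : Int) (fun _ j => j),
      0 ≤ kv.1 ∧ kv.1 < (((m.headD []).length : Nat) : Int) := by
  intro kv hkv
  rw [upsOf_eq] at hkv
  simp only [List.mem_flatMap, List.mem_map, List.mem_range] at hkv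
  obtain ⟨i, hi, j, hj, rfl⟩ := hkv
  simp only
  omega

theorem bucket_list_gen (ups : List (Int × String)) (n : Nat) (g : Nat → List String)
    (hb : ∀ kv ∈ ups, 0 ≤ kv.1 ∧ kv.1 < (n : Int))
    (hf : ∀ k < n, (ups.filter (fun kv => kv.1 == (k : Int))).map Prod.snd = g k) :
    bfold ups (List.replicate n []) = (List.range n).map g := by
  apply List.ext_getElem
  · rw [length_bfold]; simp
  · intro k h1 h2
    have hlen : (bfold ups (List.replicate n ([] : List String))).length = n := by
      rw [length_bfold]; simp
    have hk : k < n := by rw [hlen] at h1; exact h1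
    have e1 : (bfold ups (List.replicate n ([] : List String)))[k]'h1 =
        (bfold ups (List.replicate n [])).getD k [] :=
      (List.getD_eq_getElem _ _ (by rw [hlen]; exact hk)).symm
    rw [e1, getD_bfold ups _ (by simpa using hb) k, getD_replicate_nil, List.nil_append,
      hf k hk]
    simp

-- the per-row bucket/count updates of Source B's loop, one state component each
def bstep1 (cols : Int) (b : List (List String)) (p : Int × List String) : List (List String) :=
  (PySem.List.pyRange 0 cols).foldl
    (fun b j => b.modify (p.1 + j).toNat (· ++ [PySem.List.pyGetD p.2 j ""])) b
def bstep2 (cols : Int) (b : List (List String)) (p : Int × List String) : List (List String) :=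
  (PySem.List.pyRange 0 cols).foldl
    (fun b j => b.modify (p.1 + (cols - 1 - j)).toNat (· ++ [PySem.List.pyGetD p.2 j ""])) b
def bstep3 (cols : Int) (b : List (List String)) (p : Int × List String) : List (List String) :=
  (PySem.List.pyRange 0 cols).foldl
    (fun b j => b.modify j.toNat (· ++ [PySem.List.pyGetD p.2 j ""])) b
def tstep (s : String) (t : Int) (p : Int × List String) : Int :=
  t + pvCnt (pvJoin p.2) s + pvCnt (pvJoin p.2.reverse) s

theorem foldl_triple_split {α σ1 σ2 σ3 : Type} (l : List α)
    (f1 : σ1 → α → σ1) (f2 : σ2 → α → σ2) (f3 : σ3 → α → σ3) :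
    ∀ (a : σ1) (b : σ2) (c : σ3),
      l.foldl (fun (st : σ1 × σ2 × σ3) x => (f1 st.1 x, f2 st.2.1 x, f3 st.2.2 x)) (a, b, c) =
        (l.foldl f1 a, l.foldl f2 b, l.foldl f3 c) := by
  induction l with
  | nil => intro a b c; rfl
  | cons x t ih => intro a b c; simp only [List.foldl_cons]; exact ih _ _ _

theorem foldl_quad_split {α σ1 σ2 σ3 σ4 : Type} (l : List α)
    (f1 : σ1 → α → σ1) (f2 : σ2 → α → σ2) (f3 : σ3 → α → σ3) (f4 : σ4 → α → σ4) :
    ∀ (a : σ1) (b : σ2) (c : σ3) (d : σ4),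
      l.foldl (fun (st : σ1 × σ2 × σ3 × σ4) x =>
          (f1 st.1 x, f2 st.2.1 x, f3 st.2.2.1 x, f4 st.2.2.2 x)) (a, b, c, d) =
        (l.foldl f1 a, l.foldl f2 b, l.foldl f3 c, l.foldl f4 d) := by
  induction l with
  | nil => intro a b c d; rfl
  | cons x t ih => intro a b c d; simp only [List.foldl_cons]; exact ih _ _ _ _

theorem pvBRow_eq (cols : Int) (s : String) :
    pvBRow cols s = fun st p =>
      (bstep1 cols st.1 p, bstep2 cols st.2.1 p, bstep3 cols st.2.2.1 p, tstep s st.2.2.2 p) := by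
  funext st p
  unfold pvBRow bstep1 bstep2 bstep3 tstep
  simp only []
  have htri : (PySem.List.pyRange 0 cols).foldl
      (fun (b : List (List String) × List (List String) × List (List String)) j =>
        (b.1.modify (p.1 + j).toNat (· ++ [PySem.List.pyGetD p.2 j ""]),
         b.2.1.modify (p.1 + (cols - 1 - j)).toNat (· ++ [PySem.List.pyGetD p.2 j ""]),
         b.2.2.modify j.toNat (· ++ [PySem.List.pyGetD p.2 j ""])))
      (st.1, st.2.1, st.2.2.1) =
      ((PySem.List.pyRange 0 cols).foldl
         (fun b j => b.modify (p.1 + j).toNat (· ++ [PySem.List.pyGetD p.2 j ""])) st.1,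
       (PySem.List.pyRange 0 cols).foldl
         (fun b j => b.modify (p.1 + (cols - 1 - j)).toNat (· ++ [PySem.List.pyGetD p.2 j ""])) st.2.1,
       (PySem.List.pyRange 0 cols).foldl
         (fun b j => b.modify j.toNat (· ++ [PySem.List.pyGetD p.2 j ""])) st.2.2.1) :=
    foldl_triple_split _
      (fun b j => b.modify (p.1 + j).toNat (· ++ [PySem.List.pyGetD p.2 j ""]))
      (fun b j => b.modify (p.1 + (cols - 1 - j)).toNat (· ++ [PySem.List.pyGetD p.2 j ""]))
      (fun b j => b.modify j.toNat (· ++ [PySem.List.pyGetD p.2 j ""]))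
      st.1 st.2.1 st.2.2.1
  rw [htri]

theorem enum_foldl_snd {β : Type} (G : β → List String → β) (m : List (List String)) :
    ∀ (start : Int) (init : β),
      (PySem.List.enumerate m start).foldl (fun acc p => G acc p.2) init = m.foldl G init := by
  induction m with
  | nil => intro start init; rfl
  | cons r t ih =>
    intro start init
    rw [PySem.List.enumerate_cons]
    simp only [List.foldl_cons]
    exact ih _ _

-- ===== VERDICT (by name: the statement is the Claim_ definition above) =====
theorem check_string_in_rows_spec : Claim_equal_check_string_in_rows := by
  intro m s _ hpre
  obtain ⟨hm, hr⟩ := hpre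
  have hR : 1 ≤ m.length := by
    cases m with
    | nil => exact absurd rfl hm
    | cons a t => simp
  unfold Spec_check_string_in_rows check_string_in_rows check_string_in_rows_alt
  simp only []
  rw [pvBRow_eq]
  have hnd : (((m.length : Nat) : Int) + (((m.headD []).length : Nat) : Int) - 1).toNat =
      m.length + (m.headD []).length - 1 := by omega
  have hcn : ((((m.headD []).length : Nat) : Int)).toNat = (m.headD []).length := by omega
  rw [hnd, hcn]
  have hquad : (PySem.List.enumerate m).foldl
      (fun (st : List (List String) × List (List String) × List (List String) × Int) p =>
        (bstep1 (((m.headD []).length : Nat) : Int) st.1 p,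
         bstep2 (((m.headD []).length : Nat) : Int) st.2.1 p,
         bstep3 (((m.headD []).length : Nat) : Int) st.2.2.1 p,
         tstep s st.2.2.2 p))
      (List.replicate (m.length + (m.headD []).length - 1) [],
       List.replicate (m.length + (m.headD []).length - 1) [],
       List.replicate (m.headD []).length [], 0) =
      ((PySem.List.enumerate m).foldl (bstep1 (((m.headD []).length : Nat) : Int))
         (List.replicate (m.length + (m.headD []).length - 1) []),
       (PySem.List.enumerate m).foldl (bstep2 (((m.headD []).length : Nat) : Int))
         (List.replicate (m.length + (m.headD []).length - 1) []),
       (PySem.List.enumerate m).foldl (bstep3 (((m.headD []).length : Nat) : Int))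
         (List.replicate (m.headD []).length []),
       (PySem.List.enumerate m).foldl (tstep s) 0) :=
    foldl_quad_split _
      (bstep1 (((m.headD []).length : Nat) : Int))
      (bstep2 (((m.headD []).length : Nat) : Int))
      (bstep3 (((m.headD []).length : Nat) : Int))
      (tstep s) _ _ _ _
  rw [hquad]
  have hL1 : (PySem.List.enumerate m).foldl (bstep1 (((m.headD []).length : Nat) : Int))
      (List.replicate (m.length + (m.headD []).length - 1) []) =
      (List.range (m.length + (m.headD []).length - 1)).map (dcells1 m (m.headD []).length) := by
    have h1 : (PySem.List.enumerate m).foldl (bstep1 (((m.headD []).length : Nat) : Int))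
        (List.replicate (m.length + (m.headD []).length - 1) []) =
        bfold (upsOf m (((m.headD []).length : Nat) : Int) (fun i j => i + j))
          (List.replicate (m.length + (m.headD []).length - 1) []) :=
      bstep_fold m _ (fun i j => i + j) _
    rw [h1]
    exact bucket_list_gen _ _ _ (bucket_bound1 m)
      (fun k _ => ups_filter1 m (m.headD []).length k)
  have hL2 : (PySem.List.enumerate m).foldl (bstep2 (((m.headD []).length : Nat) : Int))
      (List.replicate (m.length + (m.headD []).length - 1) []) =
      (List.range (m.length + (m.headD []).length - 1)).map (dcells2 m (m.headD []).length) := by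
    have h1 : (PySem.List.enumerate m).foldl (bstep2 (((m.headD []).length : Nat) : Int))
        (List.replicate (m.length + (m.headD []).length - 1) []) =
        bfold (upsOf m (((m.headD []).length : Nat) : Int)
            (fun i j => i + ((((m.headD []).length : Nat) : Int) - 1 - j)))
          (List.replicate (m.length + (m.headD []).length - 1) []) :=
      bstep_fold m _ (fun i j => i + ((((m.headD []).length : Nat) : Int) - 1 - j)) _
    rw [h1]
    exact bucket_list_gen _ _ _ (bucket_bound2 m)
      (fun k _ => ups_filter2 m (m.headD []).length k)
  have hL3 : (PySem.List.enumerate m).foldl (bstep3 (((m.headD []).length : Nat) : Int))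
      (List.replicate (m.headD []).length []) =
      (List.range (m.headD []).length).map (colCells m) := by
    have h1 : (PySem.List.enumerate m).foldl (bstep3 (((m.headD []).length : Nat) : Int))
        (List.replicate (m.headD []).length []) =
        bfold (upsOf m (((m.headD []).length : Nat) : Int) (fun _ j => j))
          (List.replicate (m.headD []).length []) :=
      bstep_fold m _ (fun _ j => j) _
    rw [h1]
    exact bucket_list_gen _ _ _ (bucket_bound3 m)
      (fun k hk => ups_filter3 m (m.headD []).length k hk)
  have hT : (PySem.List.enumerate m).foldl (tstep s) 0 =
      m.foldl (fun acc row =>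
        acc + pvCnt (pvJoin row) s + pvCnt (pvJoin row.reverse) s) 0 :=
    enum_foldl_snd (fun acc row => acc + pvCnt (pvJoin row) s + pvCnt (pvJoin row.reverse) s) m 0 0
  rw [hL1, hL2, hL3, hT]
  rw [A_cols m hm hr, A_extract m hm]
  rw [List.foldl_map]
  rw [PySem.List.foldl_ite_eq_foldl_filter
      (p := fun dl : List String => dl ≠ [])
      (f := fun (acc : Int) (dl : List String) =>
        acc + pvCnt (pvJoin dl) s + pvCnt (pvRev (pvJoin dl)) s)]
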